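-- pv_equiv track=rewrite | github.com/maximengineer/ccpfs | features/comorbidity_flags.py | compute_comorbidity_flags
-- ===== SOURCE A (Python) =====
-- COMORBIDITY_PREFIXES = {
--     # Original 6
--     "has_heart_failure": (["I50"], ["428"]),
--     "has_diabetes": (["E10", "E11"], ["250"]),
--     "has_ckd": (["N18"], ["585"]),
--     "has_copd": (["J44"], ["496"]),
--     "has_hypertension": (["I10"], ["401"]),
--     "has_afib": (["I48"], ["427"]),
--     # New 6 — high-impact for readmission
--     "has_liver_disease": (["K70", "K71", "K72", "K73", "K74", "K75", "K76"], ["571"]),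
--     "has_malignancy": (["C0", "C1", "C2", "C3", "C4", "C5", "C6", "C7", "C8", "C9"], ["14", "15", "16", "17", "18", "19", "20"]),
--     "has_depression": (["F32", "F33"], ["296", "311"]),
--     "has_obesity": (["E66"], ["278"]),
--     "has_stroke": (["I63", "I64", "I65", "I66"], ["433", "434", "436"]),
--     "has_acs": (["I21", "I22", "I24"], ["410"]),
-- }
--
-- def compute_comorbidity_flags(diagnosis_codes: list[str]) -> dict[str, int]:
--     """Compute binary comorbidity flags from MEDS diagnosis codes.
--
--     Parameters
--     ----------
--     diagnosis_codes : list[str]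
--         MEDS-format codes, e.g. 'DIAGNOSIS//ICD//10//I5032'.
--
--     Returns
--     -------
--     dict[str, int]
--         Flag name -> 0/1.
--     """
--     # Extract ICD codes from MEDS format
--     icd_codes = []
--     for code in diagnosis_codes:
--         parts = code.split("//")
--         if len(parts) >= 4 and parts[0] == "DIAGNOSIS":
--             icd_codes.append((parts[2], parts[3]))  # (version, code)
--
--     flags = {}
--     for flag_name, (icd10_prefixes, icd9_prefixes) in COMORBIDITY_PREFIXES.items():
--         found = False
--         for version, icd_code in icd_codes:
--             if version == "10":
--                 if any(icd_code.startswith(p) for p in icd10_prefixes):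
--                     found = True
--                     break
--             elif version == "9":
--                 if any(icd_code.startswith(p) for p in icd9_prefixes):
--                     found = True
--                     break
--         flags[flag_name] = int(found)
--
--     # Count distinct 3-char ICD roots
--     roots = set()
--     for _, icd_code in icd_codes:
--         if len(icd_code) >= 3:
--             roots.add(icd_code[:3])
--     flags["n_diagnosis_categories"] = len(roots)
--     flags["n_diagnoses"] = len(icd_codes)
--
--     return flags
-- ===== SOURCE B (Python) =====
-- COMORBIDITY_PREFIXES = {
--     "has_heart_failure": (["I50"], ["428"]),
--     "has_diabetes": (["E10", "E11"], ["250"]),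
--     "has_ckd": (["N18"], ["585"]),
--     "has_copd": (["J44"], ["496"]),
--     "has_hypertension": (["I10"], ["401"]),
--     "has_afib": (["I48"], ["427"]),
--     "has_liver_disease": (["K70", "K71", "K72", "K73", "K74", "K75", "K76"], ["571"]),
--     "has_malignancy": (["C0", "C1", "C2", "C3", "C4", "C5", "C6", "C7", "C8", "C9"], ["14", "15", "16", "17", "18", "19", "20"]),
--     "has_depression": (["F32", "F33"], ["296", "311"]),
--     "has_obesity": (["E66"], ["278"]),
--     "has_stroke": (["I63", "I64", "I65", "I66"], ["433", "434", "436"]),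
--     "has_acs": (["I21", "I22", "I24"], ["410"]),
-- }
--
--
-- def _parse(raw):
--     """Return (version, code) for a MEDS diagnosis entry, else None."""
--     parts = raw.split("//")
--     if len(parts) >= 4 and parts[0] == "DIAGNOSIS":
--         return parts[2], parts[3]
--     return None
--
--
-- def _matches(name, version, code):
--     icd10_prefixes, icd9_prefixes = COMORBIDITY_PREFIXES[name]
--     if version == "10":
--         return any(code.startswith(p) for p in icd10_prefixes)
--     if version == "9":
--         return any(code.startswith(p) for p in icd9_prefixes)
--     return False
--
--
-- def compute_comorbidity_flags(diagnosis_codes: list[str]) -> dict[str, int]: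
--     """Single pass over the codes, raising flags incrementally."""
--     flags = {name: 0 for name in COMORBIDITY_PREFIXES}
--     roots = set()
--     n = 0
--     for raw in diagnosis_codes:
--         parsed = _parse(raw)
--         if parsed is None:
--             continue
--         version, code = parsed
--         for name in flags:
--             if _matches(name, version, code):
--                 flags[name] = 1
--         if len(code) >= 3:
--             roots.add(code[:3])
--         n += 1
--     flags["n_diagnosis_categories"] = len(roots)
--     flags["n_diagnoses"] = n
--     return flags
-- ===== Notes on version B (the rewrite author's own statement) =====
-- stated objective: alternative
-- what changed: Replaces A's 12 independent rescans of the parsed code list (plus two extra passes for roots and count) with a single pass over the input codes that parses each code once and incrementally raises flags, collects 3-char roots and counts diagnoses in one fold.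
import Mathlib
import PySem

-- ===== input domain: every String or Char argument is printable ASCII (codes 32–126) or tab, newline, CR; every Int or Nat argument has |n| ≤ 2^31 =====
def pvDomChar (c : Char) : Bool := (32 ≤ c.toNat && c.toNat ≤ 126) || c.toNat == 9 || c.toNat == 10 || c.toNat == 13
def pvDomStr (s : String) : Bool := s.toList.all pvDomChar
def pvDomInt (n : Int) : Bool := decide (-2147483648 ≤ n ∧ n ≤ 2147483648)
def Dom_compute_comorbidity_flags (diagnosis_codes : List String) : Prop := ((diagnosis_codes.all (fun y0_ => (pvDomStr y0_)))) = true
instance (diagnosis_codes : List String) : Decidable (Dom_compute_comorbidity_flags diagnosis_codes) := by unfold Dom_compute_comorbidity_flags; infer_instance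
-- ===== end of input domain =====

-- B replaces A's 12 independent rescans of the parsed list (plus separate roots/count passes)
-- by ONE fold over the input that parses each code once and updates flags/roots/count incrementally.

-- COMORBIDITY_PREFIXES: name -> (icd10 prefixes, icd9 prefixes), insertion order
def pvPrefixes : List (String × (List String × List String)) :=
  [ ("has_heart_failure", (["I50"], ["428"])),
    ("has_diabetes", (["E10", "E11"], ["250"])),
    ("has_ckd", (["N18"], ["585"])),
    ("has_copd", (["J44"], ["496"])),
    ("has_hypertension", (["I10"], ["401"])),
    ("has_afib", (["I48"], ["427"])),
    ("has_liver_disease", (["K70", "K71", "K72", "K73", "K74", "K75", "K76"], ["571"])),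
    ("has_malignancy", (["C0", "C1", "C2", "C3", "C4", "C5", "C6", "C7", "C8", "C9"],
                        ["14", "15", "16", "17", "18", "19", "20"])),
    ("has_depression", (["F32", "F33"], ["296", "311"])),
    ("has_obesity", (["E66"], ["278"])),
    ("has_stroke", (["I63", "I64", "I65", "I66"], ["433", "434", "436"])),
    ("has_acs", (["I21", "I22", "I24"], ["410"])) ]

-- ===== PORT A =====
-- the loop body of A's icd_codes extraction (append on a DIAGNOSIS entry with >= 4 parts)
def pvParseStepA (acc : List (String × String)) (code : String) : List (String × String) :=
  let parts := (PySem.Str.split? code "//").getD []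
  if 4 ≤ parts.length && parts.getD 0 "" == "DIAGNOSIS" then
    acc ++ [(parts.getD 2 "", parts.getD 3 "")]
  else acc

-- A's inner for-loop with break over icd_codes = any over the version-dispatched prefix test
def pvFoundA (ps : List String × List String) (icd : List (String × String)) : Bool :=
  icd.any (fun vc =>
    if vc.1 == "10" then ps.1.any (fun p => PySem.Str.startswith vc.2 p)
    else if vc.1 == "9" then ps.2.any (fun p => PySem.Str.startswith vc.2 p)
    else false)

def compute_comorbidity_flags (diagnosis_codes : List String) : List (String × Int) :=
  let icd_codes := diagnosis_codes.foldl pvParseStepA []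
  let flags := pvPrefixes.foldl
    (fun fl pr => fl ++ [(pr.1, if pvFoundA pr.2 icd_codes then (1 : Int) else 0)]) []
  let roots := icd_codes.foldl
    (fun (s : PySem.Set String) vc =>
      if 3 ≤ PySem.Str.len vc.2 then PySem.Set.add s (PySem.Str.slice vc.2 none (some 3)) else s)
    PySem.Set.empty
  flags ++ [("n_diagnosis_categories", (roots.length : Int)), ("n_diagnoses", (icd_codes.length : Int))]

-- ===== PORT B =====
-- _parse(raw): (version, code) for a MEDS diagnosis entry, else None
def pvParse1 (raw : String) : Option (String × String) :=
  let parts := (PySem.Str.split? raw "//").getD []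
  if 4 ≤ parts.length && parts.getD 0 "" == "DIAGNOSIS" then
    some (parts.getD 2 "", parts.getD 3 "")
  else none

-- _matches(name, version, code): COMORBIDITY_PREFIXES[name] lookup then version dispatch
def pvMatchesB (name : String) (version code : String) : Bool :=
  let ps := (pvPrefixes.lookup name).getD ([], [])
  if version == "10" then ps.1.any (fun p => PySem.Str.startswith code p)
  else if version == "9" then ps.2.any (fun p => PySem.Str.startswith code p)
  else false

-- one iteration of B's single pass: state = (flags assoc list, roots set, n)
def pvStepB (st : List (String × Int) × PySem.Set String × Int) (raw : String) :
    List (String × Int) × PySem.Set String × Int :=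
  match pvParse1 raw with
  | none => st
  | some (version, code) =>
    let fl := st.1.map (fun p => if pvMatchesB p.1 version code then (p.1, (1 : Int)) else p)
    let rt := if 3 ≤ PySem.Str.len code then PySem.Set.add st.2.1 (PySem.Str.slice code none (some 3))
              else st.2.1
    (fl, rt, st.2.2 + 1)

def compute_comorbidity_flags_alt (diagnosis_codes : List String) : List (String × Int) :=
  let st := diagnosis_codes.foldl pvStepB
    (pvPrefixes.map (fun pr => (pr.1, (0 : Int))), PySem.Set.empty, 0)
  st.1 ++ [("n_diagnosis_categories", (st.2.1.length : Int)), ("n_diagnoses", st.2.2)]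

-- ===== PRECONDITION & SPEC =====
def Spec_compute_comorbidity_flags (diagnosis_codes : List String) (out : List (String × Int)) : Prop := out = compute_comorbidity_flags_alt diagnosis_codes
instance (diagnosis_codes : List String) (out : List (String × Int)) : Decidable (Spec_compute_comorbidity_flags diagnosis_codes out) := by unfold Spec_compute_comorbidity_flags; infer_instance

-- ===== CLAIM (what is proved, stated in full; the proofs are below) =====
def Claim_equal_compute_comorbidity_flags : Prop := ∀ (diagnosis_codes : List String), Dom_compute_comorbidity_flags diagnosis_codes → Spec_compute_comorbidity_flags diagnosis_codes (compute_comorbidity_flags diagnosis_codes)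

-- ===== LEMMAS AND PROOFS =====

-- A's extraction loop = filterMap of B's _parse
theorem pvParseA_eq (codes : List String) (acc : List (String × String)) :
    codes.foldl pvParseStepA acc = acc ++ codes.filterMap pvParse1 := by
  induction codes generalizing acc with
  | nil => simp
  | cons c cs ih =>
    simp only [List.foldl_cons, List.filterMap_cons, ih]
    by_cases h : 4 ≤ ((PySem.Str.split? c "//").getD []).length ∧
        ((PySem.Str.split? c "//").getD [])[0]?.getD "" = "DIAGNOSIS"
    · simp [pvParseStepA, pvParse1, h]
    · simp [pvParseStepA, pvParse1, h]

-- the root-collecting step (shared shape of A's roots loop and B's root update)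
def pvRootStep (s : PySem.Set String) (vc : String × String) : PySem.Set String :=
  if 3 ≤ PySem.Str.len vc.2 then PySem.Set.add s (PySem.Str.slice vc.2 none (some 3)) else s

-- B's step on one parsed pair
def pvStepP (st : List (String × Int) × PySem.Set String × Int) (vc : String × String) :
    List (String × Int) × PySem.Set String × Int :=
  (st.1.map (fun p => if pvMatchesB p.1 vc.1 vc.2 then (p.1, (1 : Int)) else p),
   pvRootStep st.2.1 vc, st.2.2 + 1)

-- B's fold over raw codes = fold of pvStepP over the parsed pairs
theorem pvFoldB_eq (codes : List String) (st : List (String × Int) × PySem.Set String × Int) :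
    codes.foldl pvStepB st = (codes.filterMap pvParse1).foldl pvStepP st := by
  induction codes generalizing st with
  | nil => rfl
  | cons c cs ih =>
    simp only [List.foldl_cons, List.filterMap_cons]
    cases h : pvParse1 c with
    | none => simp [pvStepB, h, ih]
    | some vc =>
      cases vc with
      | mk v cc => simp [pvStepB, h, ih, pvStepP, pvRootStep]

-- characterization of the pvStepP fold, componentwise
theorem pvFoldP_char (P : List (String × String)) (fl : List (String × Int))
    (rt : PySem.Set String) (c : Int) :
    P.foldl pvStepP (fl, rt, c) =
      (fl.map (fun p => if P.any (fun vc => pvMatchesB p.1 vc.1 vc.2) then (p.1, (1 : Int)) else p),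
       P.foldl pvRootStep rt, c + P.length) := by
  induction P generalizing fl rt c with
  | nil => simp
  | cons vc P' ih =>
    simp only [List.foldl_cons, pvStepP, ih, List.map_map, List.any_cons, List.length_cons]
    refine Prod.ext ?_ (Prod.ext rfl ?_)
    · apply List.map_congr_left
      intro p _
      by_cases h1 : pvMatchesB p.1 vc.1 vc.2 <;>
        by_cases h2 : P'.any (fun vc => pvMatchesB p.1 vc.1 vc.2) = true <;>
        simp [h1, h2]
    · simp; omega

-- lookup in an assoc list with distinct keys finds the member's own value
theorem pvLookup_of_mem {β : Type} (l : List (String × β)) (h : (l.map Prod.fst).Nodup)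
    (pr : String × β) (hpr : pr ∈ l) : l.lookup pr.1 = some pr.2 := by
  induction l with
  | nil => cases hpr
  | cons a t ih =>
    simp only [List.map_cons, List.nodup_cons] at h
    rcases List.mem_cons.1 hpr with rfl | hm
    · simp [List.lookup]
    · have hne : (pr.1 == a.1) = false := by
        refine beq_eq_false_iff_ne.2 fun he => h.1 ?_
        exact he ▸ List.mem_map_of_mem hm
      cases a
      simp only [List.lookup, hne]
      exact ih h.2 hm

-- on each table entry, B's lookup-based matcher agrees with A's direct matcher
theorem pvMatches_agree (pr : String × (List String × List String)) (hpr : pr ∈ pvPrefixes)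
    (v c : String) :
    pvMatchesB pr.1 v c =
      (if v == "10" then pr.2.1.any (fun p => PySem.Str.startswith c p)
       else if v == "9" then pr.2.2.any (fun p => PySem.Str.startswith c p)
       else false) := by
  have hl : (pvPrefixes.lookup pr.1).getD ([], []) = pr.2 := by
    rw [pvLookup_of_mem pvPrefixes (by decide) pr hpr]
    rfl
  unfold pvMatchesB
  rw [hl]

-- ===== VERDICT (by name: the statement is the Claim_ definition above) =====
theorem compute_comorbidity_flags_spec : Claim_equal_compute_comorbidity_flags := by
  intro codes _
  unfold Spec_compute_comorbidity_flags compute_comorbidity_flags compute_comorbidity_flags_alt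
  rw [pvFoldB_eq, pvFoldP_char, pvParseA_eq]
  simp only [List.nil_append]
  refine congrArg₂ _ ?_ ?_
  · -- flags lists agree
    rw [PySem.List.foldl_append_singleton_eq_map, List.map_map]
    apply List.map_congr_left
    intro pr hpr
    simp only [Function.comp]
    rw [show (fun vc : String × String => pvMatchesB pr.1 vc.1 vc.2)
          = (fun vc : String × String =>
              if vc.1 == "10" then pr.2.1.any (fun p => PySem.Str.startswith vc.2 p)
              else if vc.1 == "9" then pr.2.2.any (fun p => PySem.Str.startswith vc.2 p)
              else false) from funext fun vc => pvMatches_agree pr hpr vc.1 vc.2]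
    unfold pvFoundA
    split <;> simp_all
  · -- tail: roots and diagnosis counts agree
    have hroot : (fun (s : PySem.Set String) (vc : String × String) =>
        if 3 ≤ PySem.Str.len vc.2 then PySem.Set.add s (PySem.Str.slice vc.2 none (some 3)) else s)
        = pvRootStep := rfl
    rw [hroot]
    norm_num
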